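-- pv_equiv track=rewrite | github.com/nandanwaratul74-gif/linkedin-ai-optimizer1 | agents/researcher.py | _default_certs
-- ===== SOURCE A (Python) =====
-- def _default_certs(job_title: str) -> list:
--     title_lower = job_title.lower()
--     if any(t in title_lower for t in ("cloud", "aws", "azure", "gcp")):
--         return ["AWS Solutions Architect", "Google Cloud Professional", "Azure Administrator",
--                 "Kubernetes (CKA)", "Terraform Associate"]
--     if any(t in title_lower for t in ("ml", "machine learning", "ai", "data")):
--         return ["Google Professional ML Engineer", "AWS ML Specialty",
--                 "TensorFlow Developer Certificate", "Coursera Deep Learning Specialization",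
--                 "Databricks Certified Associate"]
--     if any(t in title_lower for t in ("security", "cyber")):
--         return ["CISSP", "CEH", "CompTIA Security+", "OSCP", "AWS Security Specialty"]
--     if "project" in title_lower or "manager" in title_lower:
--         return ["PMP", "Scrum Master (CSM)", "PRINCE2", "PMI-ACP", "SAFe Agilist"]
--     return ["Relevant Cloud Certification", "Industry-Specific Certification",
--             "Agile / Scrum Certification", "Leadership & Management Certification"]
-- ===== SOURCE B (Python) =====
-- _CERTS = [
--     ["AWS Solutions Architect", "Google Cloud Professional", "Azure Administrator",
--      "Kubernetes (CKA)", "Terraform Associate"],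
--     ["Google Professional ML Engineer", "AWS ML Specialty",
--      "TensorFlow Developer Certificate", "Coursera Deep Learning Specialization",
--      "Databricks Certified Associate"],
--     ["CISSP", "CEH", "CompTIA Security+", "OSCP", "AWS Security Specialty"],
--     ["PMP", "Scrum Master (CSM)", "PRINCE2", "PMI-ACP", "SAFe Agilist"],
--     ["Relevant Cloud Certification", "Industry-Specific Certification",
--      "Agile / Scrum Certification", "Leadership & Management Certification"],
-- ]
--
-- _KEYWORD_CAT = [
--     ("cloud", 0), ("aws", 0), ("azure", 0), ("gcp", 0),
--     ("ml", 1), ("machine learning", 1), ("ai", 1), ("data", 1),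
--     ("security", 2), ("cyber", 2),
--     ("project", 3), ("manager", 3),
-- ]
--
--
-- def _default_certs(job_title: str) -> list:
--     title_lower = job_title.lower()
--     cat = min((i for kw, i in _KEYWORD_CAT if kw in title_lower), default=4)
--     return _CERTS[cat]
-- ===== Notes on version B (the rewrite author's own statement) =====
-- stated objective: alternative
-- what changed: Instead of a first-match chain of branches, B scans a flat keyword-to-category map once, takes the MINIMUM category index among all matching keywords (default 4), and indexes a certs table with it; precedence comes from the min, not from branch order or short-circuiting.
import Mathlib
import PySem

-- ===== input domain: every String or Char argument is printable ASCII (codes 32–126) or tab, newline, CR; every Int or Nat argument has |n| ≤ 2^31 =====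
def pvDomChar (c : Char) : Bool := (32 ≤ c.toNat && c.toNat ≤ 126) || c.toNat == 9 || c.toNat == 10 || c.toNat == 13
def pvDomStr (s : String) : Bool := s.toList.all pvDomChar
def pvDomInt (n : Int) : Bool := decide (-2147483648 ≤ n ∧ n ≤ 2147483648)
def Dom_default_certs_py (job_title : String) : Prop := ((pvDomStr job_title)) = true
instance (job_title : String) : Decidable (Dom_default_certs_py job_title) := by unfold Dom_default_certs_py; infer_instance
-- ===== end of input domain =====

-- B replaces A's first-match branch chain by a min-over-matching-keywords category index into a certs table (alternative decomposition, same cost); return value only.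


-- ===== PORT A =====
def default_certs_py (job_title : String) : List String :=
  let title_lower := PySem.Str.lower job_title
  if (["cloud", "aws", "azure", "gcp"] : List String).any (fun t => PySem.Str.isIn t title_lower) then
    ["AWS Solutions Architect", "Google Cloud Professional", "Azure Administrator",
     "Kubernetes (CKA)", "Terraform Associate"]
  else if (["ml", "machine learning", "ai", "data"] : List String).any (fun t => PySem.Str.isIn t title_lower) then
    ["Google Professional ML Engineer", "AWS ML Specialty",
     "TensorFlow Developer Certificate", "Coursera Deep Learning Specialization",
     "Databricks Certified Associate"]
  else if (["security", "cyber"] : List String).any (fun t => PySem.Str.isIn t title_lower) then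
    ["CISSP", "CEH", "CompTIA Security+", "OSCP", "AWS Security Specialty"]
  else if PySem.Str.isIn "project" title_lower || PySem.Str.isIn "manager" title_lower then
    ["PMP", "Scrum Master (CSM)", "PRINCE2", "PMI-ACP", "SAFe Agilist"]
  else
    ["Relevant Cloud Certification", "Industry-Specific Certification",
     "Agile / Scrum Certification", "Leadership & Management Certification"]

-- ===== PORT B =====
-- B: certs table indexed by category; the category is the minimum index among all matching keywords.
def certsTable : List (List String) :=
  [ ["AWS Solutions Architect", "Google Cloud Professional", "Azure Administrator",
     "Kubernetes (CKA)", "Terraform Associate"],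
    ["Google Professional ML Engineer", "AWS ML Specialty",
     "TensorFlow Developer Certificate", "Coursera Deep Learning Specialization",
     "Databricks Certified Associate"],
    ["CISSP", "CEH", "CompTIA Security+", "OSCP", "AWS Security Specialty"],
    ["PMP", "Scrum Master (CSM)", "PRINCE2", "PMI-ACP", "SAFe Agilist"],
    ["Relevant Cloud Certification", "Industry-Specific Certification",
     "Agile / Scrum Certification", "Leadership & Management Certification"] ]

def keywordCat : List (String × Nat) :=
  [ ("cloud", 0), ("aws", 0), ("azure", 0), ("gcp", 0),
    ("ml", 1), ("machine learning", 1), ("ai", 1), ("data", 1),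
    ("security", 2), ("cyber", 2),
    ("project", 3), ("manager", 3) ]

def default_certs_py_alt (job_title : String) : List String :=
  let title_lower := PySem.Str.lower job_title
  let cat := keywordCat.foldl
    (fun acc p => if PySem.Str.isIn p.1 title_lower then min acc p.2 else acc) 4
  certsTable.getD cat []

-- ===== PRECONDITION & SPEC =====
def Spec_default_certs_py (job_title : String) (out : List String) : Prop := out = default_certs_py_alt job_title
instance (job_title : String) (out : List String) : Decidable (Spec_default_certs_py job_title out) := by unfold Spec_default_certs_py; infer_instance

-- ===== CLAIM (what is proved, stated in full; the proofs are below) =====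
def Claim_equal_default_certs_py : Prop := ∀ (job_title : String), Dom_default_certs_py job_title → Spec_default_certs_py job_title (default_certs_py job_title)

-- ===== LEMMAS AND PROOFS =====

-- ===== VERDICT (by name: the statement is the Claim_ definition above) =====
theorem default_certs_py_spec : Claim_equal_default_certs_py := by
  intro job_title _
  unfold Spec_default_certs_py default_certs_py default_certs_py_alt
  simp only [keywordCat, List.foldl, List.any_cons, List.any_nil, Bool.or_false]
  generalize PySem.Str.isIn "cloud" (PySem.Str.lower job_title) = b1
  generalize PySem.Str.isIn "aws" (PySem.Str.lower job_title) = b2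
  generalize PySem.Str.isIn "azure" (PySem.Str.lower job_title) = b3
  generalize PySem.Str.isIn "gcp" (PySem.Str.lower job_title) = b4
  generalize PySem.Str.isIn "ml" (PySem.Str.lower job_title) = b5
  generalize PySem.Str.isIn "machine learning" (PySem.Str.lower job_title) = b6
  generalize PySem.Str.isIn "ai" (PySem.Str.lower job_title) = b7
  generalize PySem.Str.isIn "data" (PySem.Str.lower job_title) = b8
  generalize PySem.Str.isIn "security" (PySem.Str.lower job_title) = b9
  generalize PySem.Str.isIn "cyber" (PySem.Str.lower job_title) = b10
  generalize PySem.Str.isIn "project" (PySem.Str.lower job_title) = b11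
  generalize PySem.Str.isIn "manager" (PySem.Str.lower job_title) = b12
  revert b1 b2 b3 b4 b5 b6 b7 b8 b9 b10 b11 b12
  decide
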